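-- pv_equiv track=rewrite | github.com/HongDaniel/Algorithm | Python/코딩테스트/우테코/5.py | exit2
-- ===== SOURCE A (Python) =====
-- rows = 3
--
-- columns = 3
--
-- def exit2(i):
--     board = [[0]*columns for i in range(rows)]
--     num = 1
--     board[0][0] = 1
--     x, y = 0, 0
--     while(i):
--         if num % 2 == 0:  # 짝수
--             num += 1
--             x += 1
--             if x == rows:
--                 x = 0
--             board[x][y] = num
--         else:  # 홀수
--             num += 1
--             y += 1
--             if y == columns:
--                 y = 0
--             board[x][y] = num
--         i -= 1
--     return board
-- ===== SOURCE B (Python) =====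
-- rows = 3
--
-- columns = 3
--
-- def _val(i, r):
--     # last step k <= i with k % 6 == r wrote value k+1 at residue-r cell; 0 if never visited
--     return i - (i - r) % 6 + 1 if i >= r else 0
--
-- def exit2(i):
--     return [[_val(i, 0), _val(i, 1), 0],
--             [0, _val(i, 2), _val(i, 3)],
--             [_val(i, 5), 0, _val(i, 4)]]
-- ===== Notes on version B (the rewrite author's own statement) =====
-- stated objective: faster
-- what changed: B replaces A's step-by-step simulation of i alternating cyclic moves by the O(1) closed form for the last step that wrote each of the six visited cells (the walk is periodic with period 6), building the 3x3 board directly.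
import Mathlib
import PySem

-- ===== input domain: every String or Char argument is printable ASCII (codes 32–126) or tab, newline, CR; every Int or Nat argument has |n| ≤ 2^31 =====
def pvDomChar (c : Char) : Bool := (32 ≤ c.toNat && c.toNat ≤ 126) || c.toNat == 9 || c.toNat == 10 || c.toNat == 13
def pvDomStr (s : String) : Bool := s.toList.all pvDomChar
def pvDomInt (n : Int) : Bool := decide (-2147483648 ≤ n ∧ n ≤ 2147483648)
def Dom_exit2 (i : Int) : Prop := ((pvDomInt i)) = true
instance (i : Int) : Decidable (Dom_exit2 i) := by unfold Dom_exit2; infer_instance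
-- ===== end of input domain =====

-- B replaces A's O(i) step-by-step walk by the O(1) closed form for the last step
-- that wrote each cell (the walk is periodic with period 6); proved equal for all i ≥ 0.

-- ===== PORT A =====
-- board[x][y] = v for indices that are in range and nonnegative (always the case in A's run)
def pvSetCell (b : List (List Int)) (x y : Int) (v : Int) : List (List Int) :=
  b.modify x.toNat (fun row => row.set y.toNat v)

-- the while loop of A; fuel = number of remaining iterations (A runs exactly i of them for i ≥ 0)
def exit2Loop : Nat → Int → Int → Int → List (List Int) → List (List Int)
  | 0, _, _, _, board => board
  | n + 1, num, x, y, board =>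
    if num % 2 == 0 then
      let num' := num + 1
      let x' := x + 1
      let x'' := if x' == 3 then 0 else x'
      exit2Loop n num' x'' y (pvSetCell board x'' y num')
    else
      let num' := num + 1
      let y' := y + 1
      let y'' := if y' == 3 then 0 else y'
      exit2Loop n num' x y'' (pvSetCell board x y'' num')

def exit2 (i : Int) : List (List Int) :=
  exit2Loop i.toNat 1 0 0 (pvSetCell [[0, 0, 0], [0, 0, 0], [0, 0, 0]] 0 0 1)

-- ===== PORT B =====
def pvVal (i : Int) (r : Int) : Int :=
  if i ≥ r then i - PySem.Int.mod (i - r) 6 + 1 else 0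

def exit2_alt (i : Int) : List (List Int) :=
  [[pvVal i 0, pvVal i 1, 0],
   [0, pvVal i 2, pvVal i 3],
   [pvVal i 5, 0, pvVal i 4]]

-- ===== PRECONDITION & SPEC =====
-- For i < 0 Python's `while(i)` never terminates (i is decremented past 0), so A returns only for i ≥ 0.
def Pre_exit2 (i : Int) : Prop := 0 ≤ i
instance (i : Int) : Decidable (Pre_exit2 i) := by unfold Pre_exit2; infer_instance
def pvWitness_exit2 : Int := (3)

def Spec_exit2 (i : Int) (out : List (List Int)) : Prop := out = exit2_alt i
instance (i : Int) (out : List (List Int)) : Decidable (Spec_exit2 i out) := by unfold Spec_exit2; infer_instance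

-- ===== CLAIM (what is proved, stated in full; the proofs are below) =====
def Claim_equal_exit2 : Prop := ∀ (i : Int), Dom_exit2 i → Pre_exit2 i → Spec_exit2 i (exit2 i)


-- ===== LEMMAS AND PROOFS =====

-- the walk's state after m steps is (num, x, y) = (m + 1, m/2 % 3, (m+1)/2 % 3); starting the
-- remaining n iterations of A's loop there turns B's closed-form board for m into the one for m + n
theorem exit2Loop_inv (n : Nat) : ∀ m : Nat,
    exit2Loop n ((m + 1 : Nat) : Int) ((m / 2 % 3 : Nat) : Int)
      (((m + 1) / 2 % 3 : Nat) : Int) (exit2_alt (m : Int)) = exit2_alt ((m + n : Nat) : Int) := by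
  induction n with
  | zero => intro m; simp [exit2Loop]
  | succ n ih =>
    intro m
    obtain ⟨q, c, hc, rfl⟩ : ∃ q c, c < 6 ∧ m = 6 * q + c :=
      ⟨m / 6, m % 6, Nat.mod_lt _ (by omega), by omega⟩
    interval_cases c
    · rw [show 6 * q + 0 + (n + 1) = (6 * q + 0 + 1) + n from by omega, ← ih (6 * q + 0 + 1)]
      simp only [exit2Loop, beq_iff_eq]
      first | rw [if_pos (by omega)] | rw [if_neg (by omega)]
      norm_num [show (6 * q) / 2 = 3 * q from by omega, show (6 * q + 1) / 2 = 3 * q from by omega,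
        show (6 * q + 2) / 2 = 3 * q + 1 from by omega, show (6 * q + 3) / 2 = 3 * q + 1 from by omega,
        show (6 * q + 4) / 2 = 3 * q + 2 from by omega, show (6 * q + 5) / 2 = 3 * q + 2 from by omega,
        show (6 * q + 6) / 2 = 3 * q + 3 from by omega,
        show (3 * q) % 3 = 0 from by omega, show (3 * q + 1) % 3 = 1 % 3 from by omega,
        show (3 * q + 2) % 3 = 2 % 3 from by omega, show (3 * q + 3) % 3 = 0 from by omega]
      congr 1 <;>
        first
          | omega
          | (simp only [exit2_alt, pvSetCell, pvVal,
               PySem.Int.mod_eq_emod_of_pos (show (0 : Int) < 6 by norm_num), List.modify,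
               Int.toNat]
             norm_num
             and_intros <;> first | omega | (split_ifs <;> omega))
    · rw [show 6 * q + 1 + (n + 1) = (6 * q + 1 + 1) + n from by omega, ← ih (6 * q + 1 + 1)]
      simp only [exit2Loop, beq_iff_eq]
      first | rw [if_pos (by omega)] | rw [if_neg (by omega)]
      norm_num [show (6 * q) / 2 = 3 * q from by omega, show (6 * q + 1) / 2 = 3 * q from by omega,
        show (6 * q + 2) / 2 = 3 * q + 1 from by omega, show (6 * q + 3) / 2 = 3 * q + 1 from by omega,
        show (6 * q + 4) / 2 = 3 * q + 2 from by omega, show (6 * q + 5) / 2 = 3 * q + 2 from by omega,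
        show (6 * q + 6) / 2 = 3 * q + 3 from by omega,
        show (3 * q) % 3 = 0 from by omega, show (3 * q + 1) % 3 = 1 % 3 from by omega,
        show (3 * q + 2) % 3 = 2 % 3 from by omega, show (3 * q + 3) % 3 = 0 from by omega]
      congr 1 <;>
        first
          | omega
          | (simp only [exit2_alt, pvSetCell, pvVal,
               PySem.Int.mod_eq_emod_of_pos (show (0 : Int) < 6 by norm_num), List.modify,
               Int.toNat]
             norm_num
             and_intros <;> first | omega | (split_ifs <;> omega))
    · rw [show 6 * q + 2 + (n + 1) = (6 * q + 2 + 1) + n from by omega, ← ih (6 * q + 2 + 1)]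
      simp only [exit2Loop, beq_iff_eq]
      first | rw [if_pos (by omega)] | rw [if_neg (by omega)]
      norm_num [show (6 * q) / 2 = 3 * q from by omega, show (6 * q + 1) / 2 = 3 * q from by omega,
        show (6 * q + 2) / 2 = 3 * q + 1 from by omega, show (6 * q + 3) / 2 = 3 * q + 1 from by omega,
        show (6 * q + 4) / 2 = 3 * q + 2 from by omega, show (6 * q + 5) / 2 = 3 * q + 2 from by omega,
        show (6 * q + 6) / 2 = 3 * q + 3 from by omega,
        show (3 * q) % 3 = 0 from by omega, show (3 * q + 1) % 3 = 1 % 3 from by omega,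
        show (3 * q + 2) % 3 = 2 % 3 from by omega, show (3 * q + 3) % 3 = 0 from by omega]
      congr 1 <;>
        first
          | omega
          | (simp only [exit2_alt, pvSetCell, pvVal,
               PySem.Int.mod_eq_emod_of_pos (show (0 : Int) < 6 by norm_num), List.modify,
               Int.toNat]
             norm_num
             and_intros <;> first | omega | (split_ifs <;> omega))
    · rw [show 6 * q + 3 + (n + 1) = (6 * q + 3 + 1) + n from by omega, ← ih (6 * q + 3 + 1)]
      simp only [exit2Loop, beq_iff_eq]
      first | rw [if_pos (by omega)] | rw [if_neg (by omega)]
      norm_num [show (6 * q) / 2 = 3 * q from by omega, show (6 * q + 1) / 2 = 3 * q from by omega,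
        show (6 * q + 2) / 2 = 3 * q + 1 from by omega, show (6 * q + 3) / 2 = 3 * q + 1 from by omega,
        show (6 * q + 4) / 2 = 3 * q + 2 from by omega, show (6 * q + 5) / 2 = 3 * q + 2 from by omega,
        show (6 * q + 6) / 2 = 3 * q + 3 from by omega,
        show (3 * q) % 3 = 0 from by omega, show (3 * q + 1) % 3 = 1 % 3 from by omega,
        show (3 * q + 2) % 3 = 2 % 3 from by omega, show (3 * q + 3) % 3 = 0 from by omega]
      congr 1 <;>
        first
          | omega
          | (simp only [exit2_alt, pvSetCell, pvVal,
               PySem.Int.mod_eq_emod_of_pos (show (0 : Int) < 6 by norm_num), List.modify,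
               Int.toNat]
             norm_num
             and_intros <;> first | omega | (split_ifs <;> omega))
    · rw [show 6 * q + 4 + (n + 1) = (6 * q + 4 + 1) + n from by omega, ← ih (6 * q + 4 + 1)]
      simp only [exit2Loop, beq_iff_eq]
      first | rw [if_pos (by omega)] | rw [if_neg (by omega)]
      norm_num [show (6 * q) / 2 = 3 * q from by omega, show (6 * q + 1) / 2 = 3 * q from by omega,
        show (6 * q + 2) / 2 = 3 * q + 1 from by omega, show (6 * q + 3) / 2 = 3 * q + 1 from by omega,
        show (6 * q + 4) / 2 = 3 * q + 2 from by omega, show (6 * q + 5) / 2 = 3 * q + 2 from by omega,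
        show (6 * q + 6) / 2 = 3 * q + 3 from by omega,
        show (3 * q) % 3 = 0 from by omega, show (3 * q + 1) % 3 = 1 % 3 from by omega,
        show (3 * q + 2) % 3 = 2 % 3 from by omega, show (3 * q + 3) % 3 = 0 from by omega]
      congr 1 <;>
        first
          | omega
          | (simp only [exit2_alt, pvSetCell, pvVal,
               PySem.Int.mod_eq_emod_of_pos (show (0 : Int) < 6 by norm_num), List.modify,
               Int.toNat]
             norm_num
             and_intros <;> first | omega | (split_ifs <;> omega))
    · rw [show 6 * q + 5 + (n + 1) = (6 * q + 5 + 1) + n from by omega, ← ih (6 * q + 5 + 1)]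
      simp only [exit2Loop, beq_iff_eq]
      first | rw [if_pos (by omega)] | rw [if_neg (by omega)]
      norm_num [show (6 * q) / 2 = 3 * q from by omega, show (6 * q + 1) / 2 = 3 * q from by omega,
        show (6 * q + 2) / 2 = 3 * q + 1 from by omega, show (6 * q + 3) / 2 = 3 * q + 1 from by omega,
        show (6 * q + 4) / 2 = 3 * q + 2 from by omega, show (6 * q + 5) / 2 = 3 * q + 2 from by omega,
        show (6 * q + 6) / 2 = 3 * q + 3 from by omega,
        show (3 * q) % 3 = 0 from by omega, show (3 * q + 1) % 3 = 1 % 3 from by omega,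
        show (3 * q + 2) % 3 = 2 % 3 from by omega, show (3 * q + 3) % 3 = 0 from by omega]
      congr 1 <;>
        first
          | omega
          | (simp only [exit2_alt, pvSetCell, pvVal,
               PySem.Int.mod_eq_emod_of_pos (show (0 : Int) < 6 by norm_num), List.modify,
               Int.toNat]
             norm_num
             and_intros <;> first | omega | (split_ifs <;> omega))

-- ===== VERDICT (by name: the statement is the Claim_ definition above) =====
theorem exit2_spec : Claim_equal_exit2 := by
  intro i _ hpre
  unfold Spec_exit2 exit2
  have h := exit2Loop_inv i.toNat 0
  norm_num at h
  rw [show (pvSetCell [[0, 0, 0], [0, 0, 0], [0, 0, 0]] 0 0 1)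
        = exit2_alt ((0 : Nat) : Int) from by decide]
  rw [Nat.cast_zero, h, max_eq_left hpre]
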